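-- pv_equiv track=rewrite | github.com/Lxy-3037/- | repair/repair_main.py | locate_vulnerabilities_in_source_code
-- ===== SOURCE A (Python) =====
-- def locate_vulnerabilities_in_source_code(source_code):
--     """
--     Locate the vulnerability code segments surrounded by <S2SV_StartBug> and <S2SV_EndBug> in the given source code.
--     """
--     start_tag = "<S2SV_StartBug>"
--     end_tag = "<S2SV_EndBug>"
--     vulnerability_codes = []
--
--     start_index = source_code.find(start_tag)
--     while start_index != -1:
--         end_index = source_code.find(end_tag, start_index)
--         if end_index != -1:
--             vulnerability_code = source_code[start_index + len(start_tag): end_index].strip()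
--             vulnerability_codes.append(vulnerability_code)
--             start_index = source_code.find(start_tag, end_index)
--         else:
--             break
--
--     return vulnerability_codes
-- ===== SOURCE B (Python) =====
-- import re
--
-- _BUG_RE = re.compile(r'<S2SV_StartBug>(.*?)<S2SV_EndBug>', re.DOTALL)
--
--
-- def locate_vulnerabilities_in_source_code(source_code):
--     """
--     Locate the vulnerability code segments surrounded by <S2SV_StartBug> and <S2SV_EndBug> in the given source code.
--     """
--     return [segment.strip() for segment in _BUG_RE.findall(source_code)]
-- ===== Notes on version B (the rewrite author's own statement) =====
-- stated objective: idiomatic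
-- what changed: Replaces the explicit find/find/slice index loop with a single non-greedy regex scan (re.findall with DOTALL) plus a strip comprehension.
import Mathlib
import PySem

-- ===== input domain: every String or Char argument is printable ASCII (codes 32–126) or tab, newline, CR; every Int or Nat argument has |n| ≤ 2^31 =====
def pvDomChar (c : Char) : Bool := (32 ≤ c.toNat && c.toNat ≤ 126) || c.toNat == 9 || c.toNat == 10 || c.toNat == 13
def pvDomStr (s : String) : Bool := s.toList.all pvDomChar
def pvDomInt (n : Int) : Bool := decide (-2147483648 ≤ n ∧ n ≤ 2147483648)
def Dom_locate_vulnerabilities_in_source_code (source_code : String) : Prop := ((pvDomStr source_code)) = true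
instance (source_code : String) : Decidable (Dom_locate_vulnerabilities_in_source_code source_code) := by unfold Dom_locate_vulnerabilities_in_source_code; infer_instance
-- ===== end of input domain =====

-- B replaces A's explicit find/find/slice index loop by a single regex scan
-- (re.findall with a non-greedy capture, ported as a structural scan over the
-- character list); objective: idiomatic. A and B return the same list.

-- ===== PORT A =====
def pvStartTag : String := "<S2SV_StartBug>"
def pvEndTag : String := "<S2SV_EndBug>"

-- the while-loop of A; fuel only makes the transliterated loop total (length+1 iterations always suffice)
def pvLoopA (s : String) (acc : List String) (start_index : Int) : Nat → List String
  | 0 => acc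
  | fuel + 1 =>
    if start_index = -1 then acc
    else
      let end_index := PySem.Str.findFrom s pvEndTag start_index
      if end_index ≠ -1 then
        pvLoopA s
          (acc ++ [PySem.Str.strip (PySem.Str.slice s (some (start_index + PySem.Str.len pvStartTag)) (some end_index))])
          (PySem.Str.findFrom s pvStartTag end_index) fuel
      else acc

def locate_vulnerabilities_in_source_code (source_code : String) : List String :=
  pvLoopA source_code [] (PySem.Str.find source_code pvStartTag) (source_code.toList.length + 1)

-- ===== PORT B =====
-- Source B: return [segment.strip() for segment in re.findall(r'<S2SV_StartBug>(.*?)<S2SV_EndBug>', source_code, re.DOTALL)]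
-- The regex scan is ported by hand, exactly for this fixed pattern: advance to the first
-- occurrence of the start literal, capture non-greedily up to the first occurrence of the
-- end literal, resume after it.
def pvStartTagL : List Char := "<S2SV_StartBug>".toList
def pvEndTagL : List Char := "<S2SV_EndBug>".toList

-- split at the FIRST occurrence of the literal pat: (text before it, text after it)
def pvSplitAfter (pat : List Char) : List Char → Option (List Char × List Char)
  | [] => none
  | c :: cs =>
    if pat.isPrefixOf (c :: cs) then some ([], (c :: cs).drop pat.length)
    else
      match pvSplitAfter pat cs with
      | none => none
      | some (b, a) => some (c :: b, a)

-- needed (only) by pvScan's termination proof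
theorem pvSplitAfter_len {pat : List Char} : ∀ {cs b a : List Char},
    pvSplitAfter pat cs = some (b, a) → b.length + pat.length + a.length = cs.length := by
  intro cs
  induction cs with
  | nil => intro b a h; simp [pvSplitAfter] at h
  | cons c cs ih =>
    intro b a h
    by_cases hp : pat.isPrefixOf (c :: cs)
    · rw [pvSplitAfter, if_pos hp] at h
      have hle : pat.length ≤ (c :: cs).length :=
        ((List.isPrefixOf_iff_prefix).mp hp).length_le
      obtain ⟨rfl, rfl⟩ := Prod.mk.injEq _ _ _ _ ▸ Option.some.injEq _ _ ▸ h
      simp [List.length_drop] at *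
      omega
    · rw [pvSplitAfter, if_neg hp] at h
      cases hrec : pvSplitAfter pat cs with
      | none => rw [hrec] at h; exact absurd h (by simp)
      | some r =>
        obtain ⟨b', a'⟩ := r
        rw [hrec] at h
        simp only [Option.some.injEq, Prod.mk.injEq] at h
        obtain ⟨rfl, rfl⟩ := h
        have := ih hrec
        simp [List.length_cons]
        omega

-- the regex findall scan: each match is (captured segment, text after the match)
def pvScan (cs : List Char) : List (List Char) :=
  match h1 : pvSplitAfter pvStartTagL cs with
  | none => []
  | some (_, rest) =>
    match h2 : pvSplitAfter pvEndTagL rest with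
    | none => []
    | some (seg, rest2) => PySem.Chars.strip seg :: pvScan rest2
termination_by cs.length
decreasing_by
  have e1 := pvSplitAfter_len h1
  have e2 := pvSplitAfter_len h2
  have hs : pvStartTagL.length = 15 := by decide
  have he : pvEndTagL.length = 13 := by decide
  omega

def locate_vulnerabilities_in_source_code_alt (source_code : String) : List String :=
  (pvScan source_code.toList).map String.ofList

-- ===== PRECONDITION & SPEC =====
def Spec_locate_vulnerabilities_in_source_code (source_code : String) (out : List String) : Prop := out = locate_vulnerabilities_in_source_code_alt source_code
instance (source_code : String) (out : List String) : Decidable (Spec_locate_vulnerabilities_in_source_code source_code out) := by unfold Spec_locate_vulnerabilities_in_source_code; infer_instance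

-- ===== CLAIM (what is proved, stated in full; the proofs are below) =====
def Claim_equal_locate_vulnerabilities_in_source_code : Prop := ∀ (source_code : String), Dom_locate_vulnerabilities_in_source_code source_code → Spec_locate_vulnerabilities_in_source_code source_code (locate_vulnerabilities_in_source_code source_code)

-- ===== LEMMAS AND PROOFS =====

theorem pvScan_none {cs : List Char} (h : pvSplitAfter pvStartTagL cs = none) : pvScan cs = [] := by
  rw [pvScan, h]

theorem pvScan_some {cs b rest : List Char} (h : pvSplitAfter pvStartTagL cs = some (b, rest)) :
    pvScan cs = (match pvSplitAfter pvEndTagL rest with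
      | none => []
      | some (seg, rest2) => PySem.Chars.strip seg :: pvScan rest2) := by
  rw [pvScan, h]
  split
  · rename_i heq; exact absurd heq (by simp)
  · rename_i seg' rest' heq
    simp only [Option.some.injEq, Prod.mk.injEq] at heq
    obtain ⟨rfl, rfl⟩ := heq
    split
    · rename_i heq2; rw [heq2]
    · rename_i seg2 rest3 heq2; rw [heq2]

theorem pv_prefix_getElem? {p u : List Char} (h : p <+: u) (k : Nat) (hk : k < p.length) :
    u[k]? = some p[k] := by
  obtain ⟨t, rfl⟩ := h
  rw [List.getElem?_append_left hk, List.getElem?_eq_getElem hk]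

-- the end literal cannot start inside an occurrence of the start literal
theorem pv_no_et_in_st {u : List Char} (h : pvStartTagL <+: u) :
    ∀ k, k < 15 → ¬ pvEndTagL <+: u.drop k := by
  intro k hk hc
  rcases Nat.eq_zero_or_pos k with rfl | hk1
  · rw [List.drop_zero] at hc
    have a := pv_prefix_getElem? h 6 (by decide)
    have b := pv_prefix_getElem? hc 6 (by decide)
    rw [a] at b
    exact absurd b (by decide)
  · have a := pv_prefix_getElem? h k (by rw [show pvStartTagL.length = 15 from by decide]; omega)
    have b := pv_prefix_getElem? hc 0 (by decide)
    rw [List.getElem?_drop, Nat.add_zero, a] at b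
    have hst : pvStartTagL[k]? = some '<' := by
      rw [List.getElem?_eq_getElem (by rw [show pvStartTagL.length = 15 from by decide]; omega)]
      simpa using b
    have hne : ∀ m : Fin 15, 1 ≤ m.1 → pvStartTagL[m.1]? ≠ some '<' := by decide
    exact hne ⟨k, hk⟩ hk1 hst

-- the start literal cannot start inside an occurrence of the end literal
theorem pv_no_st_in_et {u : List Char} (h : pvEndTagL <+: u) :
    ∀ k, k < 13 → ¬ pvStartTagL <+: u.drop k := by
  intro k hk hc
  rcases Nat.eq_zero_or_pos k with rfl | hk1
  · rw [List.drop_zero] at hc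
    have a := pv_prefix_getElem? h 6 (by decide)
    have b := pv_prefix_getElem? hc 6 (by decide)
    rw [a] at b
    exact absurd b (by decide)
  · have a := pv_prefix_getElem? h k (by rw [show pvEndTagL.length = 13 from by decide]; omega)
    have b := pv_prefix_getElem? hc 0 (by decide)
    rw [List.getElem?_drop, Nat.add_zero, a] at b
    have hst : pvEndTagL[k]? = some '<' := by
      rw [List.getElem?_eq_getElem (by rw [show pvEndTagL.length = 13 from by decide]; omega)]
      simpa using b
    have hne : ∀ m : Fin 13, 1 ≤ m.1 → pvEndTagL[m.1]? ≠ some '<' := by decide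
    exact hne ⟨k, hk⟩ hk1 hst

theorem pv_splitAfter_none_iff {pat : List Char} (hpat : pat ≠ []) : ∀ {cs : List Char},
    pvSplitAfter pat cs = none ↔ ∀ j, ¬ pat <+: cs.drop j := by
  intro cs
  induction cs with
  | nil =>
    simp only [pvSplitAfter, List.drop_nil, true_iff]
    intro j hp
    exact hpat (List.prefix_nil.mp hp)
  | cons c cs ih =>
    by_cases hp : pat.isPrefixOf (c :: cs)
    · rw [pvSplitAfter, if_pos hp]
      constructor
      · intro h; simp at h
      · intro h; exact absurd (List.isPrefixOf_iff_prefix.mp hp) (by simpa using h 0)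
    · rw [pvSplitAfter, if_neg hp]
      constructor
      · intro h j
        cases j with
        | zero => simp only [List.drop_zero]; exact fun hpre => hp (List.isPrefixOf_iff_prefix.mpr hpre)
        | succ j =>
          rw [List.drop_succ_cons]
          cases hrec : pvSplitAfter pat cs with
          | none => exact (ih.mp hrec) j
          | some r => rw [hrec] at h; obtain ⟨b, a⟩ := r; simp at h
      · intro h
        cases hrec : pvSplitAfter pat cs with
        | none => rfl
        | some r =>
          exfalso
          have : pvSplitAfter pat cs = none := ih.mpr (fun j => by simpa using h (j + 1))
          rw [this] at hrec; exact absurd hrec (by simp)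

theorem pv_splitAfter_eq_some {pat : List Char} (hpat : pat ≠ []) : ∀ {cs : List Char} (k : Nat),
    pat <+: cs.drop k → (∀ j, j < k → ¬ pat <+: cs.drop j) →
    pvSplitAfter pat cs = some (cs.take k, cs.drop (k + pat.length)) := by
  intro cs
  induction cs with
  | nil =>
    intro k hocc _hmin
    exfalso
    rw [List.drop_nil] at hocc
    exact absurd (List.prefix_nil.mp hocc) hpat
  | cons c cs ih =>
    intro k hocc hmin
    cases k with
    | zero =>
      rw [List.drop_zero] at hocc
      rw [pvSplitAfter, if_pos (List.isPrefixOf_iff_prefix.mpr hocc)]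
      simp
    | succ k =>
      have hp : ¬ pat.isPrefixOf (c :: cs) := fun h =>
        hmin 0 (Nat.succ_pos _) (by simpa using List.isPrefixOf_iff_prefix.mp h)
      rw [pvSplitAfter, if_neg hp]
      rw [List.drop_succ_cons] at hocc
      rw [ih k hocc (fun j hj => by simpa using hmin (j + 1) (by omega))]
      show some (c :: List.take k cs, List.drop (k + pat.length) cs) = _
      rw [List.take_succ_cons, show k + 1 + pat.length = (k + pat.length) + 1 by omega,
        List.drop_succ_cons]

theorem pv_infix_drop {pat u : List Char} (h : pat <:+: u) : ∃ j, pat <+: u.drop j := by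
  obtain ⟨a, b, rfl⟩ := h
  exact ⟨a.length, by simp [List.drop_left]⟩

-- findFrom is the unique position ≥ k at which pat occurs first
theorem pv_findFrom_eq (l pat : List Char) (k : Nat) (hk : k ≤ l.length) (r : Nat)
    (hkr : k ≤ r) (hocc : pat <+: l.drop r) (hmin : ∀ j, k ≤ j → j < r → ¬ pat <+: l.drop j) :
    PySem.Chars.findFrom l pat (k : Int) = (r : Int) := by
  have hinf : pat <:+: l.drop k := by
    have h1 : pat <+: (l.drop k).drop (r - k) := by
      rw [List.drop_drop, show k + (r - k) = r by omega]
      exact hocc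
    exact h1.isInfix.trans (List.drop_suffix _ _).isInfix
  have hne : PySem.Chars.findFrom l pat (k : Int) ≠ -1 := by
    intro he
    exact ((PySem.Chars.findFrom_natCast_eq_neg_one_iff l pat k hk).mp he) hinf
  obtain ⟨hge, hoccF, hminF⟩ := PySem.Chars.findFrom_natCast_spec l pat k hk hne
  set F := PySem.Chars.findFrom l pat (k : Int) with hF
  have h0 : 0 ≤ F := le_trans (by positivity) hge
  have hFt : F = (F.toNat : Int) := by omega
  rcases lt_trichotomy F.toNat r with h | h | h
  · exact absurd hoccF (hmin F.toNat (by omega) h)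
  · omega
  · exact absurd hocc (hminF r hkr h)

theorem pv_findFrom_neg (l pat : List Char) (k : Nat) (hk : k ≤ l.length)
    (h : ∀ j, k ≤ j → ¬ pat <+: l.drop j) :
    PySem.Chars.findFrom l pat (k : Int) = -1 := by
  rw [PySem.Chars.findFrom_natCast_eq_neg_one_iff l pat k hk]
  intro hinf
  obtain ⟨j, hj⟩ := pv_infix_drop hinf
  rw [List.drop_drop] at hj
  exact h (k + j) (by omega) hj

set_option maxHeartbeats 1000000 in
theorem pv_main (s : String) : ∀ (fuel : Nat) (i : Nat) (acc : List String),
    i ≤ s.toList.length → s.toList.length - i < fuel →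
    pvLoopA s acc (PySem.Chars.findFrom s.toList pvStartTagL (i : Int)) fuel
      = acc ++ (pvScan (s.toList.drop i)).map String.ofList := by
  intro fuel
  induction fuel with
  | zero => intro i acc _ h2; omega
  | succ fuel ih =>
    intro i acc hi hfuel
    have hstne : pvStartTagL ≠ [] := by decide
    have hetne : pvEndTagL ≠ [] := by decide
    by_cases hF : PySem.Chars.findFrom s.toList pvStartTagL (i : Int) = -1
    · -- no start tag left: the loop stops, the scan matches nothing
      have hni : ¬ pvStartTagL <:+: s.toList.drop i :=
        (PySem.Chars.findFrom_natCast_eq_neg_one_iff _ _ i hi).mp hF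
      have hno : ∀ j, ¬ pvStartTagL <+: (s.toList.drop i).drop j := fun j hj =>
        hni (hj.isInfix.trans (List.drop_suffix _ _).isInfix)
      rw [hF, pvLoopA, if_pos rfl, pvScan_none ((pv_splitAfter_none_iff hstne).mpr hno)]
      simp
    · obtain ⟨hge, hoccF, hminF⟩ :=
        PySem.Chars.findFrom_natCast_spec s.toList pvStartTagL i hi hF
      set l := s.toList with hls
      set F := PySem.Chars.findFrom l pvStartTagL (i : Int) with hFdef
      have hF0 : 0 ≤ F := le_trans (by positivity) hge
      set p := F.toNat with hpdef
      have hFp : F = (p : Int) := by omega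
      have hip : i ≤ p := by omega
      have hp15 : p + 15 ≤ l.length := by
        have hlen := hoccF.length_le
        rw [List.length_drop, show pvStartTagL.length = 15 from by decide] at hlen
        omega
      -- B's first split: before/after the first start tag at or after i
      have hsplit1 : pvSplitAfter pvStartTagL (l.drop i) =
          some ((l.drop i).take (p - i), (l.drop i).drop ((p - i) + pvStartTagL.length)) := by
        apply pv_splitAfter_eq_some hstne
        · rw [List.drop_drop, show i + (p - i) = p by omega]; exact hoccF
        · intro j hj hpre
          rw [List.drop_drop] at hpre
          exact hminF (i + j) (by omega) (by omega) hpre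
      rw [show pvStartTagL.length = 15 from by decide] at hsplit1
      have hrest : (l.drop i).drop ((p - i) + 15) = l.drop (p + 15) := by
        rw [List.drop_drop, show i + ((p - i) + 15) = p + 15 by omega]
      -- A's end_index
      have hsf : PySem.Str.findFrom s pvEndTag F = PySem.Chars.findFrom l pvEndTagL ((p : Nat) : Int) := by
        rw [hFp]; rfl
      by_cases hE : PySem.Chars.findFrom l pvEndTagL ((p : Nat) : Int) = -1
      · -- start tag with no end tag after it: loop breaks, scan has no match
        have hniE : ¬ pvEndTagL <:+: l.drop p :=
          (PySem.Chars.findFrom_natCast_eq_neg_one_iff l pvEndTagL p (by omega)).mp hE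
        have hno2 : ∀ j, ¬ pvEndTagL <+: (l.drop (p + 15)).drop j := by
          intro j hj
          rw [List.drop_drop] at hj
          apply hniE
          have hj' : pvEndTagL <+: (l.drop p).drop (15 + j) := by
            rw [List.drop_drop, show p + (15 + j) = (p + 15) + j by omega]
            exact hj
          exact hj'.isInfix.trans (List.drop_suffix _ _).isInfix
        rw [pvLoopA]
        rw [if_neg hF]
        simp only [hsf, hE, ne_eq, not_true_eq_false, if_false]
        rw [pvScan_some hsplit1, hrest,
          (pv_splitAfter_none_iff hetne).mpr hno2]
        simp
      · obtain ⟨hgeE, hoccE, hminE⟩ :=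
          PySem.Chars.findFrom_natCast_spec l pvEndTagL p (by omega) hE
        set E := PySem.Chars.findFrom l pvEndTagL ((p : Nat) : Int) with hEdef
        have hE0 : 0 ≤ E := le_trans (by positivity) hgeE
        set q := E.toNat with hqdef
        have hEq : E = (q : Int) := by omega
        have hpq : p ≤ q := by omega
        have hq13 : q + 13 ≤ l.length := by
          have hlen := hoccE.length_le
          rw [List.length_drop, show pvEndTagL.length = 13 from by decide] at hlen
          omega
        have hq15 : p + 15 ≤ q := by
          by_contra hcon
          apply pv_no_et_in_st hoccF (q - p) (by omega)
          rw [List.drop_drop, show p + (q - p) = q by omega]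
          exact hoccE
        -- B's second split: the captured segment and the text after the end tag
        have hsplit2 : pvSplitAfter pvEndTagL (l.drop (p + 15)) =
            some ((l.drop (p + 15)).take (q - (p + 15)),
                  (l.drop (p + 15)).drop ((q - (p + 15)) + pvEndTagL.length)) := by
          apply pv_splitAfter_eq_some hetne
          · rw [List.drop_drop, show (p + 15) + (q - (p + 15)) = q by omega]; exact hoccE
          · intro j hj hpre
            rw [List.drop_drop] at hpre
            exact hminE ((p + 15) + j) (by omega) (by omega) hpre
        rw [show pvEndTagL.length = 13 from by decide] at hsplit2
        have hrest2 : (l.drop (p + 15)).drop ((q - (p + 15)) + 13) = l.drop (q + 13) := by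
          rw [List.drop_drop, show (p + 15) + ((q - (p + 15)) + 13) = q + 13 by omega]
        -- A resumes its start-tag search at the end tag, B after it; no start tag can
        -- begin inside the end tag, so the two searches agree
        have hskip : PySem.Chars.findFrom l pvStartTagL ((q : Nat) : Int)
            = PySem.Chars.findFrom l pvStartTagL (((q + 13 : Nat)) : Int) := by
          by_cases hN : PySem.Chars.findFrom l pvStartTagL (((q + 13 : Nat)) : Int) = -1
          · rw [hN]
            apply pv_findFrom_neg l pvStartTagL q (by omega)
            intro j hjq hpre
            by_cases hj13 : j < q + 13
            · apply pv_no_st_in_et hoccE (j - q) (by omega)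
              rw [List.drop_drop, show q + (j - q) = j by omega]
              exact hpre
            · have hinf := (PySem.Chars.findFrom_natCast_eq_neg_one_iff l pvStartTagL
                (q + 13) (by omega)).mp hN
              apply hinf
              have hpre' : pvStartTagL <+: (l.drop (q + 13)).drop (j - (q + 13)) := by
                rw [List.drop_drop, show (q + 13) + (j - (q + 13)) = j by omega]
                exact hpre
              exact hpre'.isInfix.trans (List.drop_suffix _ _).isInfix
          · obtain ⟨hge3, hocc3, hmin3⟩ :=
              PySem.Chars.findFrom_natCast_spec l pvStartTagL (q + 13) (by omega) hN
            set R := PySem.Chars.findFrom l pvStartTagL (((q + 13 : Nat)) : Int) with hRdef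
            have hR0 : 0 ≤ R := le_trans (by positivity) hge3
            have hRr : R = (R.toNat : Int) := by omega
            rw [hRr]
            apply pv_findFrom_eq l pvStartTagL q (by omega) R.toNat (by omega) hocc3
            intro j hjq hjr hpre
            by_cases hj13 : j < q + 13
            · apply pv_no_st_in_et hoccE (j - q) (by omega)
              rw [List.drop_drop, show q + (j - q) = j by omega]
              exact hpre
            · exact hmin3 j (by omega) hjr hpre
        -- A's next start index, at the Chars level
        have hsf2 : PySem.Str.findFrom s pvStartTag E
            = PySem.Chars.findFrom l pvStartTagL (((q + 13 : Nat)) : Int) := by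
          rw [← hskip, hEq]; rfl
        -- A's captured segment equals B's
        have hseg : PySem.Str.strip (PySem.Str.slice s (some (F + PySem.Str.len pvStartTag)) (some E))
            = String.ofList (PySem.Chars.strip ((l.drop (p + 15)).take (q - (p + 15)))) := by
          have hsl : (PySem.Str.slice s (some ((p : Int) + 15)) (some ((q : Nat) : Int))).toList
              = (l.drop (p + 15)).take (q - (p + 15)) := by
            rw [PySem.Str.slice, String.toList_ofList,
              show ((p : Int) + 15) = ((p + 15 : Nat) : Int) by push_cast; ring,
              PySem.Chars.slice_eq_listSlice, ← hls, PySem.List.slice_natCast]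
          rw [hFp, hEq, show PySem.Str.len pvStartTag = 15 from by decide,
            PySem.Str.strip, hsl]
        -- unfold one loop iteration and recurse
        rw [pvLoopA]
        rw [if_neg hF]
        simp only [hsf]
        rw [if_pos (by rw [hEq]; intro hc; omega)]
        rw [hsf2, ih (q + 13) _ (by omega) (by omega)]
        rw [pvScan_some hsplit1, hrest, hsplit2, hrest2]
        rw [hseg]
        simp

-- ===== VERDICT (by name: the statement is the Claim_ definition above) =====
theorem locate_vulnerabilities_in_source_code_spec : Claim_equal_locate_vulnerabilities_in_source_code := by
  intro s _
  unfold Spec_locate_vulnerabilities_in_source_code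
  unfold locate_vulnerabilities_in_source_code locate_vulnerabilities_in_source_code_alt
  have h0 : PySem.Str.find s pvStartTag = PySem.Chars.findFrom s.toList pvStartTagL ((0 : Nat) : Int) := by
    simp [PySem.Str.find, PySem.Chars.findFrom_zero, pvStartTagL, pvStartTag]
  rw [h0, pv_main s (s.toList.length + 1) 0 [] (by omega) (by omega)]
  simp
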